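-- pv_equiv track=rewrite | github.com/djinn-pfa3736/research_plan_analysis | rohan_subwindow.py | compile_skeleton
-- ===== SOURCE A (Python) =====
-- def compile_skeleton(symbol_skeleton):
--     compiled_skeleton = []
--     circle_num = 1
--     horizontal_flag = 0
--     for i in range(0, len(symbol_skeleton)):
--         if(symbol_skeleton[i].startswith('H')):
--             horizontal_flag = 1
--             circle_num += 1
--         elif(symbol_skeleton[i].startswith('V')):
--             if(horizontal_flag == 1):
--                 horizontal_flag = 0
--                 compiled_skeleton.append('H:' + str(circle_num))
--                 circle_num = 1
--             compiled_skeleton.append('V')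
--     if(1 < circle_num):
--         compiled_skeleton.append('H:' + str(circle_num))
--     return compiled_skeleton
-- ===== SOURCE B (Python) =====
-- def compile_skeleton(symbol_skeleton):
--     # True = horizontal symbol, False = vertical symbol; everything else is dropped
--     toks = [s.startswith('H') for s in symbol_skeleton
--             if s.startswith('H') or s.startswith('V')]
--     out = []
--     i, n = 0, len(toks)
--     while i < n:
--         j = i
--         while j < n and toks[j] == toks[i]:
--             j += 1
--         if toks[i]:
--             out.append('H:' + str(j - i + 1))
--         else:
--             out.extend(['V'] * (j - i))
--         i = j
--     return out
-- ===== Notes on version B (the rewrite author's own statement) =====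
-- stated objective: alternative
-- what changed: B first filters/maps the symbols to a Boolean token stream (H/V) and then run-length-encodes that stream group by group, instead of A's single indexed loop threading a pending counter and a horizontal flag with a trailing flush.
import Mathlib
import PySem

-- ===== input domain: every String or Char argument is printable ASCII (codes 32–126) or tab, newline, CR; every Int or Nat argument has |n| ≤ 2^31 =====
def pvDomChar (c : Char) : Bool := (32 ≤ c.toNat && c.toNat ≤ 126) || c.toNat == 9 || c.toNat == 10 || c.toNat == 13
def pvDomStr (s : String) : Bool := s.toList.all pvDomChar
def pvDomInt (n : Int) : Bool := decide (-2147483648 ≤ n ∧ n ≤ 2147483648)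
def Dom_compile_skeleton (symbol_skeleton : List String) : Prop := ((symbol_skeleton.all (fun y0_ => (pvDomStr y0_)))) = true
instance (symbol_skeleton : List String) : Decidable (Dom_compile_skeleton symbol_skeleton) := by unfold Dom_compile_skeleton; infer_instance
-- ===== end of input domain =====

-- B replaces A's flag-and-counter loop by filtering to a Boolean H/V token stream and
-- run-length-encoding it; same return value, no speed claim.

-- ===== PORT A =====
-- literal transliteration of A: indexed loop over range(0, len), state
-- (compiled_skeleton, circle_num, horizontal_flag), trailing flush.
def compile_skeleton (symbol_skeleton : List String) : List String :=
  let st :=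
    (PySem.List.pyRange 0 (PySem.List.len symbol_skeleton) 1).foldl
      (fun (st : List String × Int × Int) i =>
        pvStepA st (PySem.List.pyGetD symbol_skeleton i ""))
      ([], 1, 0)
  if 1 < st.2.1 then st.1 ++ ["H:" ++ PySem.Int.toStr st.2.1] else st.1
where
  pvStepA (st : List String × Int × Int) (s : String) : List String × Int × Int :=
    if PySem.Str.startswith s "H" then (st.1, st.2.1 + 1, 1)
    else if PySem.Str.startswith s "V" then
      if st.2.2 == 1 then (st.1 ++ ["H:" ++ PySem.Int.toStr st.2.1, "V"], 1, 0)
      else (st.1 ++ ["V"], st.2.1, st.2.2)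
    else st

-- ===== PORT B =====
-- run-length encoder over the Boolean token stream (true = H, false = V):
-- the inner while-loop of Source B extracting one run is takeWhile/dropWhile.
def pvBGroups : List Bool → List String
  | [] => []
  | x :: t =>
    let run := t.takeWhile (· == x)
    let rest := t.dropWhile (· == x)
    (if x then ["H:" ++ PySem.Int.toStr ((run.length : Int) + 1 + 1)]
     else List.replicate (run.length + 1) "V") ++ pvBGroups rest
termination_by ts => ts.length
decreasing_by
  simpa using Nat.lt_succ_of_le (List.length_dropWhile_le (· == x) t)

def compile_skeleton_alt (symbol_skeleton : List String) : List String :=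
  pvBGroups
    ((symbol_skeleton.filter
        (fun s => PySem.Str.startswith s "H" || PySem.Str.startswith s "V")).map
      (fun s => PySem.Str.startswith s "H"))

-- ===== PRECONDITION & SPEC =====
def Spec_compile_skeleton (symbol_skeleton : List String) (out : List String) : Prop := out = compile_skeleton_alt symbol_skeleton
instance (symbol_skeleton : List String) (out : List String) : Decidable (Spec_compile_skeleton symbol_skeleton out) := by unfold Spec_compile_skeleton; infer_instance

-- ===== CLAIM (what is proved, stated in full; the proofs are below) =====
def Claim_equal_compile_skeleton : Prop := ∀ (symbol_skeleton : List String), Dom_compile_skeleton symbol_skeleton → Spec_compile_skeleton symbol_skeleton (compile_skeleton symbol_skeleton)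

-- ===== LEMMAS AND PROOFS =====

-- token classification shared by the proof: some true = H-symbol, some false = V-symbol
def pvTok (s : String) : Option Bool :=
  if PySem.Str.startswith s "H" then some true
  else if PySem.Str.startswith s "V" then some false
  else none

-- A's step on the token alphabet
def pvStepT (st : List String × Int × Int) (b : Bool) : List String × Int × Int :=
  if b then (st.1, st.2.1 + 1, 1)
  else if st.2.2 == 1 then (st.1 ++ ["H:" ++ PySem.Int.toStr st.2.1, "V"], 1, 0)
  else (st.1 ++ ["V"], st.2.1, st.2.2)

-- abstract recurrence describing A's output with pending counter c
def pvOut (c : Int) : List Bool → List String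
  | [] => if 1 < c then ["H:" ++ PySem.Int.toStr c] else []
  | true :: t => pvOut (c + 1) t
  | false :: t =>
      (if 1 < c then ["H:" ++ PySem.Int.toStr c, "V"] else ["V"]) ++ pvOut 1 t

theorem pvFoldA_filterMap (xs : List String) (st : List String × Int × Int) :
    xs.foldl compile_skeleton.pvStepA st = (xs.filterMap pvTok).foldl pvStepT st := by
  induction xs generalizing st with
  | nil => rfl
  | cons s t ih =>
    rw [List.foldl_cons, ih]
    by_cases h1 : PySem.Chars.startswith s.toList ['H'] = true
    · rw [List.filterMap_cons_some (show pvTok s = some true by simp [pvTok, h1])]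
      rw [List.foldl_cons]
      congr 1
      simp [compile_skeleton.pvStepA, pvStepT, h1]
    · by_cases h2 : PySem.Chars.startswith s.toList ['V'] = true
      · rw [List.filterMap_cons_some
          (show pvTok s = some false by simp [pvTok, h1, h2])]
        rw [List.foldl_cons]
        congr 1
        simp [compile_skeleton.pvStepA, pvStepT, h1, h2]
      · rw [List.filterMap_cons_none (show pvTok s = none by simp [pvTok, h1, h2])]
        congr 1
        simp [compile_skeleton.pvStepA, h1, h2]

theorem pvTokens_eq (xs : List String) :
    (xs.filter
        (fun s => PySem.Str.startswith s "H" || PySem.Str.startswith s "V")).map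
      (fun s => PySem.Str.startswith s "H") = xs.filterMap pvTok := by
  induction xs with
  | nil => rfl
  | cons s t ih =>
    simp only [PySem.Str.startswith_eq,
      show "H".toList = ['H'] by decide, show "V".toList = ['V'] by decide] at ih ⊢
    by_cases h1 : PySem.Chars.startswith s.toList ['H'] = true
    · rw [List.filterMap_cons_some (show pvTok s = some true by simp [pvTok, h1])]
      simp [h1, ih]
    · by_cases h2 : PySem.Chars.startswith s.toList ['V'] = true
      · rw [List.filterMap_cons_some
          (show pvTok s = some false by simp [pvTok, h1, h2])]
        simp [h1, h2, ih]
      · rw [List.filterMap_cons_none (show pvTok s = none by simp [pvTok, h1, h2])]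
        simp [h1, h2, ih]

def pvFinal (st : List String × Int × Int) : List String :=
  if 1 < st.2.1 then st.1 ++ ["H:" ++ PySem.Int.toStr st.2.1] else st.1

theorem pvFold_out (ts : List Bool) :
    ∀ (acc : List String) (c : Int), 1 ≤ c →
      pvFinal (ts.foldl pvStepT (acc, c, if 1 < c then (1 : Int) else 0)) =
        acc ++ pvOut c ts := by
  induction ts with
  | nil =>
    intro acc c hc
    simp only [List.foldl_nil]
    unfold pvFinal pvOut
    split_ifs <;> simp_all
  | cons b t ih =>
    intro acc c hc
    cases b with
    | true =>
      simp only [List.foldl_cons]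
      have h1 : (1 : Int) < c + 1 := by omega
      have := ih acc (c + 1) (by omega)
      rw [if_pos h1] at this
      simpa [pvStepT, h1, pvOut] using this
    | false =>
      simp only [List.foldl_cons]
      by_cases h : (1 : Int) < c
      · rw [if_pos h]
        have := ih (acc ++ ["H:" ++ PySem.Int.toStr c, "V"]) 1 le_rfl
        rw [if_neg (by omega)] at this
        simpa [pvStepT, pvOut, h] using this
      · have hc1 : c = 1 := by omega
        subst hc1
        rw [if_neg (by omega)]
        have := ih (acc ++ ["V"]) 1 le_rfl
        rw [if_neg (by omega)] at this
        simpa [pvStepT, pvOut] using this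

theorem pvOut_replicate (k : Nat) :
    ∀ (c : Int) (t : List Bool),
      pvOut c (List.replicate k true ++ t) = pvOut (c + k) t := by
  induction k with
  | zero => intro c t; simp
  | succ k ih =>
    intro c t
    rw [List.replicate_succ, List.cons_append]
    show pvOut (c + 1) (List.replicate k true ++ t) = _
    rw [ih]
    congr 1
    push_cast
    ring

theorem pvOut_flush (c : Int) (t : List Bool)
    (hc : 1 < c) (ht : t = [] ∨ ∃ t', t = false :: t') :
    pvOut c t = ("H:" ++ PySem.Int.toStr c) :: pvOut 1 t := by
  rcases ht with rfl | ⟨t', rfl⟩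
  · simp [pvOut, hc]
  · simp [pvOut, hc]

theorem pvBGroups_vrun (t : List Bool) :
    List.replicate (t.takeWhile (· == false)).length "V" ++
      pvBGroups (t.dropWhile (· == false)) = pvBGroups t := by
  induction t with
  | nil => rfl
  | cons b t ih =>
    cases b with
    | true => simp
    | false =>
      rw [pvBGroups]
      simp only [List.takeWhile_cons, List.dropWhile_cons]
      simp [List.replicate_succ', List.append_assoc]

theorem pvTakeWhile_true (t : List Bool) :
    t.takeWhile (· == true) = List.replicate (t.takeWhile (· == true)).length true := by
  induction t with
  | nil => rfl
  | cons b t ih =>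
    cases b with
    | true => simpa [List.takeWhile_cons, List.replicate_succ] using ih
    | false => simp

theorem pvDropWhile_true_shape (t : List Bool) :
    t.dropWhile (· == true) = [] ∨ ∃ t', t.dropWhile (· == true) = false :: t' := by
  induction t with
  | nil => exact Or.inl rfl
  | cons b t ih =>
    cases b with
    | true => simpa [List.dropWhile_cons] using ih
    | false => exact Or.inr ⟨t, by simp⟩

theorem pvOut_eq_bgroups (n : Nat) :
    ∀ (ts : List Bool), ts.length ≤ n → pvOut 1 ts = pvBGroups ts := by
  induction n with
  | zero =>
    intro ts h
    rw [List.length_eq_zero_iff.mp (Nat.le_zero.mp h)]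
    simp [pvOut, pvBGroups]
  | succ n ih =>
    intro ts h
    match ts with
    | [] => simp [pvOut, pvBGroups]
    | false :: t =>
      rw [show pvOut 1 (false :: t) = "V" :: pvOut 1 t by simp [pvOut]]
      rw [ih t (by simpa using Nat.le_of_succ_le_succ h)]
      rw [← pvBGroups_vrun t]
      rw [pvBGroups]
      simp [List.replicate_succ]
    | true :: t =>
      have hsplit : t = t.takeWhile (· == true) ++ t.dropWhile (· == true) :=
        (List.takeWhile_append_dropWhile).symm
      have hlen : (t.dropWhile (· == true)).length ≤ n :=
        le_trans (List.length_dropWhile_le _ t) (by simpa using Nat.le_of_succ_le_succ h)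
      have h1 : pvOut 1 (true :: t) =
          pvOut (((t.takeWhile (· == true)).length : Int) + 1 + 1)
            (t.dropWhile (· == true)) := by
        show pvOut (1 + 1) t = _
        conv_lhs => rw [hsplit, pvTakeWhile_true t]
        rw [pvOut_replicate]
        congr 1
        ring
      rw [h1, pvOut_flush _ _ (by omega) (pvDropWhile_true_shape t),
        ih _ hlen]
      rw [pvBGroups]
      simp

-- ===== VERDICT (by name: the statement is the Claim_ definition above) =====
theorem compile_skeleton_spec : Claim_equal_compile_skeleton := by
  intro xs _
  unfold Spec_compile_skeleton compile_skeleton compile_skeleton_alt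
  rw [PySem.List.foldl_pyRange_zero_pyGetD xs "" compile_skeleton.pvStepA ([], 1, 0)]
  rw [pvFoldA_filterMap, pvTokens_eq]
  have := pvFold_out (xs.filterMap pvTok) [] 1 le_rfl
  rw [if_neg (by omega)] at this
  simp only [pvFinal] at this
  rw [this, List.nil_append,
    pvOut_eq_bgroups (xs.filterMap pvTok).length _ le_rfl]
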